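-- pv_equiv track=rewrite | github.com/durapensa/ksi | ksi_daemon/orchestration/initialization_router.py | _sequence_by_timing
-- ===== SOURCE A (Python) =====
-- from typing import Dict, List, Any, Optional
--
-- def _sequence_by_timing(message_plan: List[Dict[str, Any]]) -> List[Dict[str, Any]]:
--     """Sequence messages based on timing constraints."""
--     # Parse timing dependencies
--     sequenced = []
--     immediate = []
--     concurrent = []
--     delayed = []
--
--     for message in message_plan:
--         timing = message.get('timing', 'immediate')
--
--         if timing == 'immediate':
--             immediate.append(message)
--         elif timing == 'concurrent':
--             concurrent.append(message)
--         elif timing.startswith('after:'):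
--             # Dependency-based timing
--             dependency = timing.split(':', 1)[1]
--             message['dependency'] = dependency
--             delayed.append(message)
--         else:
--             # Default to immediate
--             immediate.append(message)
--
--     # Sequence: immediate -> concurrent -> dependency-resolved
--     sequenced.extend(immediate)
--     sequenced.extend(concurrent)
--
--     # Resolve dependencies (simplified - just append in order)
--     sequenced.extend(delayed)
--
--     return sequenced
-- ===== SOURCE B (Python) =====
-- def _sequence_by_timing(message_plan):
--     """Sequence messages based on timing constraints (stable sort by timing class)."""
--     def priority(message):
--         timing = message.get('timing', 'immediate')
--         if timing == 'concurrent':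
--             return 1
--         if timing.startswith('after:'):
--             message['dependency'] = timing.split(':', 1)[1]
--             return 2
--         return 0
--     return sorted(message_plan, key=priority)
-- ===== Notes on version B (the rewrite author's own statement) =====
-- stated objective: simpler
-- what changed: Replaces the four explicit buckets and their concatenation with a single stable sort by a 0/1/2 priority key (immediate/other=0, concurrent=1, after:=2), relying on sort stability to preserve intra-group order.
import Mathlib
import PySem

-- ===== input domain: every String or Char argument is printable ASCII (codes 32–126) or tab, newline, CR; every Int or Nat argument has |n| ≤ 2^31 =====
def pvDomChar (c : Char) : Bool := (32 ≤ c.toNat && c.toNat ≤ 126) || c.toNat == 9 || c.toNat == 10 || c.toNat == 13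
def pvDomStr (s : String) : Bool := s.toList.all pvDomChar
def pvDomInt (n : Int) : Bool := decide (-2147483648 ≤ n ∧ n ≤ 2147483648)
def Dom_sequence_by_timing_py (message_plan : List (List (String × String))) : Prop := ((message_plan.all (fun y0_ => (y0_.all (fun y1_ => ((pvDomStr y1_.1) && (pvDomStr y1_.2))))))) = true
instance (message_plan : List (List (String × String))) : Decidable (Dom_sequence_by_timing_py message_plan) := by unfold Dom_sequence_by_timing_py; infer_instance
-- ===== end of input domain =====

-- B replaces A's four buckets with one stable sort by a 0/1/2 priority key (simpler, not faster).
-- Both A and B mutate 'after:' messages in place in the same way; the equivalence proved is about the return value.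

-- shared primitive helpers (each is one Python expression both sources contain verbatim)
-- message.get('timing', 'immediate')
def pvGetTiming (m : List (String × String)) : String :=
  PySem.Dict.getD (PySem.Dict.mk m) "timing" "immediate"

-- message['dependency'] = timing.split(':', 1)[1]  (the pyGet?/split options are always 'some'
-- here because this is only evaluated under the startswith "after:" guard, so ':' occurs in timing)
def pvSetDep (m : List (String × String)) (timing : String) : List (String × String) :=
  let dep := (PySem.List.pyGet? ((PySem.Str.splitMax? timing ":" 1).getD []) 1).getD ""
  (PySem.Dict.insert (PySem.Dict.mk m) "dependency" dep).items

-- ===== PORT A =====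
-- the for-loop over message_plan with the three bucket accumulators
def pvLoopA (msgs : List (List (String × String)))
    (immediate concurrent delayed : List (List (String × String))) :
    List (List (String × String)) × List (List (String × String)) × List (List (String × String)) :=
  match msgs with
  | [] => (immediate, concurrent, delayed)
  | m :: rest =>
    let timing := pvGetTiming m
    if timing == "immediate" then pvLoopA rest (immediate ++ [m]) concurrent delayed
    else if timing == "concurrent" then pvLoopA rest immediate (concurrent ++ [m]) delayed
    else if PySem.Str.startswith timing "after:" then
      pvLoopA rest immediate concurrent (delayed ++ [pvSetDep m timing])
    else pvLoopA rest (immediate ++ [m]) concurrent delayed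

def sequence_by_timing_py (message_plan : List (List (String × String))) : List (List (String × String)) :=
  let r := pvLoopA message_plan [] [] []
  (([] ++ r.1) ++ r.2.1) ++ r.2.2

-- ===== PORT B =====
-- priority(message): returns the key and the (possibly mutated) message
def pvPrio (m : List (String × String)) : Int × List (String × String) :=
  let timing := pvGetTiming m
  if timing == "concurrent" then (1, m)
  else if PySem.Str.startswith timing "after:" then (2, pvSetDep m timing)
  else (0, m)

-- sorted(message_plan, key=priority): decorate with the key (mutating as Python's key calls do), stable-sort, undecorate
def sequence_by_timing_py_alt (message_plan : List (List (String × String))) : List (List (String × String)) :=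
  (PySem.List.sorted (message_plan.map pvPrio) (fun p => p.1) false).map Prod.snd

-- ===== PRECONDITION & SPEC =====
def Spec_sequence_by_timing_py (message_plan : List (List (String × String))) (out : List (List (String × String))) : Prop := out = sequence_by_timing_py_alt message_plan
instance (message_plan : List (List (String × String))) (out : List (List (String × String))) : Decidable (Spec_sequence_by_timing_py message_plan out) := by unfold Spec_sequence_by_timing_py; infer_instance

-- ===== CLAIM (what is proved, stated in full; the proofs are below) =====
def Claim_equal_sequence_by_timing_py : Prop := ∀ (message_plan : List (List (String × String))), Dom_sequence_by_timing_py message_plan → Spec_sequence_by_timing_py message_plan (sequence_by_timing_py message_plan)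

-- ===== LEMMAS AND PROOFS =====

-- inserting past a prefix no element of which x goes before
theorem pv_insertBy_append_not_before {α : Type} (before : α → α → Bool) (x : α)
    (as bs : List α) (h : ∀ a ∈ as, before x a = false) :
    PySem.List.insertBy before x (as ++ bs) = as ++ PySem.List.insertBy before x bs := by
  induction as with
  | nil => simp
  | cons a as ih =>
    have ha : before x a = false := h a (by simp)
    simp [PySem.List.insertBy, ha, ih (fun a' ha' => h a' (by simp [ha']))]

-- inserting before a list every element of which x goes before
theorem pv_insertBy_all_before {α : Type} (before : α → α → Bool) (x : α)
    (bs : List α) (h : ∀ b ∈ bs, before x b = true) :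
    PySem.List.insertBy before x bs = x :: bs := by
  cases bs with
  | nil => simp [PySem.List.insertBy]
  | cons b bs => simp [PySem.List.insertBy, h b (by simp)]

-- stable sort of 0/1/2-keyed pairs is the three filtered groups concatenated
theorem pv_sorted_partition {α : Type} (ds : List (Int × α))
    (h : ∀ d ∈ ds, d.1 = 0 ∨ d.1 = 1 ∨ d.1 = 2) :
    PySem.List.sorted ds (fun p => p.1) false =
      ds.filter (fun d => d.1 == 0) ++ ds.filter (fun d => d.1 == 1) ++ ds.filter (fun d => d.1 == 2) := by
  induction ds using List.reverseRecOn with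
  | nil => simp [PySem.List.sorted_eq_foldl_insertBy]
  | append_singleton ds x ih =>
    have hds : ∀ d ∈ ds, d.1 = 0 ∨ d.1 = 1 ∨ d.1 = 2 := fun d hd => h d (by simp [hd])
    have hstep : PySem.List.sorted (ds ++ [x]) (fun p => p.1) false =
        PySem.List.insertBy (fun a b => decide (a.1 < b.1)) x (PySem.List.sorted ds (fun p => p.1) false) := by
      rw [PySem.List.sorted_eq_foldl_insertBy, PySem.List.sorted_eq_foldl_insertBy, List.foldl_append]
      simp
    rw [hstep, ih hds]
    have hx := h x (by simp)
    have f0 : ∀ a ∈ ds.filter (fun d => d.1 == 0), a.1 = 0 := by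
      intro a ha; simpa using (List.of_mem_filter ha)
    have f1 : ∀ a ∈ ds.filter (fun d => d.1 == 1), a.1 = 1 := by
      intro a ha; simpa using (List.of_mem_filter ha)
    have f2 : ∀ a ∈ ds.filter (fun d => d.1 == 2), a.1 = 2 := by
      intro a ha; simpa using (List.of_mem_filter ha)
    rcases hx with hx | hx | hx
    · -- key 0: past group 0 (stability), before groups 1 and 2
      rw [List.append_assoc, pv_insertBy_append_not_before _ x _ _ (by
          intro a ha; simp [hx, f0 a ha]),
        pv_insertBy_all_before _ x _ (by
          intro b hb
          rcases List.mem_append.1 hb with hb | hb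
          · simp [hx, f1 b hb]
          · simp [hx, f2 b hb])]
      simp [List.filter_append, hx]
    · -- key 1: past groups 0 and 1, before group 2
      rw [pv_insertBy_append_not_before _ x _ _ (by
          intro a ha
          rcases List.mem_append.1 ha with ha | ha
          · simp [hx, f0 a ha]
          · simp [hx, f1 a ha]),
        pv_insertBy_all_before _ x _ (by intro b hb; simp [hx, f2 b hb])]
      simp [List.filter_append, hx]
    · -- key 2: past everything
      rw [PySem.List.insertBy_of_forall_not_before _ x _ (by
        intro a ha
        rcases List.mem_append.1 ha with ha | ha
        · rcases List.mem_append.1 ha with ha | ha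
          · simp [hx, f0 a ha]
          · simp [hx, f1 a ha]
        · simp [hx, f2 a ha])]
      simp [List.filter_append, hx]

-- A's loop invariant: the buckets are the filtered decorated groups
theorem pv_loopA_eq (msgs : List (List (String × String)))
    (imm conc del : List (List (String × String))) :
    pvLoopA msgs imm conc del =
      (imm ++ ((msgs.map pvPrio).filter (fun d => d.1 == 0)).map Prod.snd,
       conc ++ ((msgs.map pvPrio).filter (fun d => d.1 == 1)).map Prod.snd,
       del ++ ((msgs.map pvPrio).filter (fun d => d.1 == 2)).map Prod.snd) := by
  induction msgs generalizing imm conc del with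
  | nil => simp [pvLoopA]
  | cons m rest ih =>
    by_cases h0 : pvGetTiming m == "immediate"
    · have ht := eq_of_beq h0
      simp [pvLoopA, pvPrio, ht, PySem.Chars.startswith, ih]
    · by_cases h1 : pvGetTiming m == "concurrent"
      · simp [pvLoopA, pvPrio, h0, h1, ih]
      · by_cases h2 : PySem.Chars.startswith (pvGetTiming m).toList ['a','f','t','e','r',':']
        · simp [pvLoopA, pvPrio, h0, h1, h2, ih]
        · simp [pvLoopA, pvPrio, h0, h1, h2, ih]

theorem pv_prio_key (m : List (String × String)) :
    (pvPrio m).1 = 0 ∨ (pvPrio m).1 = 1 ∨ (pvPrio m).1 = 2 := by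
  by_cases h1 : pvGetTiming m == "concurrent"
  · simp [pvPrio, h1]
  · by_cases h2 : PySem.Chars.startswith (pvGetTiming m).toList ['a','f','t','e','r',':']
    · simp [pvPrio, h1, h2]
    · simp [pvPrio, h1, h2]

-- ===== VERDICT (by name: the statement is the Claim_ definition above) =====
theorem sequence_by_timing_py_spec : Claim_equal_sequence_by_timing_py := by
  intro mp _
  unfold Spec_sequence_by_timing_py sequence_by_timing_py sequence_by_timing_py_alt
  rw [pv_sorted_partition _ (by
    intro d hd
    rcases List.mem_map.1 hd with ⟨m, _, rfl⟩
    exact pv_prio_key m)]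
  simp [pv_loopA_eq]
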